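-- pv_equiv track=rewrite | github.com/team-7-ELEVEN/one-day-one-solve | 송가람/시험들....../카카오모빌리티2.py | solution
-- ===== SOURCE A (Python) =====
-- def solution(id_list, k):
--     dic = {}
--     for i in id_list:
--         ids = list(set(i.split()))
--         for id in ids:
--             if not (id in dic):
--                 dic[id] = 1
--             elif id in dic:
--                 dic[id] += 1
--
--             if dic[id] >= k:
--                 dic[id] = k
--                 continue
--
--     return sum(dic[item] for item in dic)
-- ===== SOURCE B (Python) =====
-- def solution(id_list, k):
--     # sort-then-scan: flatten per-list distinct words, sort, then add min(run length, k) per run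
--     words = sorted(w for s in id_list for w in set(s.split()))
--     total = 0
--     i = 0
--     n = len(words)
--     while i < n:
--         j = i + 1
--         while j < n and words[j] == words[i]:
--             j += 1
--         total += min(j - i, k)
--         i = j
--     return total
-- ===== Notes on version B (the rewrite author's own statement) =====
-- stated objective: alternative
-- what changed: B replaces A's dict with inline capped counting by a sort-then-scan: it flattens the per-list distinct words into one list, sorts it, and sums min(run length, k) over maximal runs of equal words, with no dictionary at all.
import Mathlib
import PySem

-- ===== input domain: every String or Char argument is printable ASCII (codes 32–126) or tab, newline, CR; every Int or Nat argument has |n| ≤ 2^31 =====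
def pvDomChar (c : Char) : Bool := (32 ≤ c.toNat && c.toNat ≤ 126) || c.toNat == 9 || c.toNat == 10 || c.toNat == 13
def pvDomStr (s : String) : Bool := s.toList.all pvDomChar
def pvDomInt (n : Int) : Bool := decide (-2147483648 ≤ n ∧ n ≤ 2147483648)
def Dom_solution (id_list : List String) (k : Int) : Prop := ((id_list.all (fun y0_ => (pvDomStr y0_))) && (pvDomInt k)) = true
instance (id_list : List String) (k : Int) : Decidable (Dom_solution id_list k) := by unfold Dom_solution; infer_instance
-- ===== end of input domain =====

-- B replaces A's dict of inline-capped counters by a sort-then-scan over the flattened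
-- per-list distinct words, summing min(run length, k) per maximal run; alternative decomposition.

-- ===== PORT A =====
-- A's loop body over one id: insert-or-increment, then pin the entry at k when it reaches k.
def solStepA (k : Int) (d : PySem.Dict String Int) (id : String) : PySem.Dict String Int :=
  let d1 :=
    if !(d.contains id) then d.insert id 1
    else if d.contains id then d.modify id 0 (· + 1)
    else d
  if d1.getD id 0 ≥ k then d1.insert id k else d1

-- A's dict after the whole double loop.
def solDicA (id_list : List String) (k : Int) : PySem.Dict String Int :=
  id_list.foldl
    (fun d i => (PySem.Set.ofList (PySem.Str.split₀ i)).foldl (solStepA k) d)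
    PySem.Dict.empty

def solution (id_list : List String) (k : Int) : Int :=
  ((solDicA id_list k).keys.map (fun item => (solDicA id_list k).getD item 0)).sum

-- ===== PORT B =====
-- B's nested while loops: the inner while counts the run of words equal to words[i]
-- (takeWhile), the outer while restarts at j, the first differing position (dropWhile).
def runScan (k : Int) : List String → Int
  | [] => 0
  | w :: rest =>
      min ((1 + (rest.takeWhile (· == w)).length : Int)) k +
        runScan k (rest.dropWhile (· == w))
termination_by L => L.length
decreasing_by
  exact Nat.lt_succ_of_le (List.length_dropWhile_le _ _)

def solution_alt (id_list : List String) (k : Int) : Int :=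
  runScan k
    (PySem.List.sorted (id_list.flatMap (fun s => PySem.Set.ofList (PySem.Str.split₀ s)))
      (fun x => x) false)

-- ===== PRECONDITION & SPEC =====
def Spec_solution (id_list : List String) (k : Int) (out : Int) : Prop := out = solution_alt id_list k
instance (id_list : List String) (k : Int) (out : Int) : Decidable (Spec_solution id_list k out) := by unfold Spec_solution; infer_instance

-- ===== CLAIM (what is proved, stated in full; the proofs are below) =====
def Claim_equal_solution : Prop := ∀ (id_list : List String) (k : Int), Dom_solution id_list k → Spec_solution id_list k (solution id_list k)

-- ===== LEMMAS AND PROOFS =====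

-- The multiset of words both programs consume: per-list distinct words, concatenated.
def solWords (id_list : List String) : List String :=
  id_list.flatMap (fun s => PySem.Set.ofList (PySem.Str.split₀ s))

-- Invariant of A's dict after processing the flat word list P: keys are distinct, keys
-- are exactly the words seen, each value is min(count so far, k).
def DInv (k : Int) (P : List String) (d : PySem.Dict String Int) : Prop :=
  d.keys.Nodup ∧ (∀ w, w ∈ d.keys ↔ w ∈ P) ∧
    ∀ w ∈ P, d.getD w 0 = min ((P.count w : Int)) k

theorem dinv_step (k : Int) (P : List String) (d : PySem.Dict String Int) (w : String)
    (h : DInv k P d) : DInv k (P ++ [w]) (solStepA k d w) := by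
  obtain ⟨hn, hm, hv⟩ := h
  by_cases hc : d.contains w = true
  · -- w already counted: A increments, then maybe pins at k
    have hwP : w ∈ P := (hm w).mp ((PySem.Dict.contains_iff_mem_keys _ _).mp hc)
    have hstep : solStepA k d w =
        if (d.modify w 0 (· + 1)).getD w 0 ≥ k then (d.modify w 0 (· + 1)).insert w k
        else d.modify w 0 (· + 1) := by
      simp [solStepA, hc]
    have hkm : (d.modify w 0 (· + 1)).keys = d.keys := by
      rw [PySem.Dict.keys_modify, PySem.Dict.keys_insert_of_contains d _ hc]
    have hgw : (d.modify w 0 (· + 1)).getD w 0 = min ((P.count w : Int)) k + 1 := by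
      rw [PySem.Dict.getD_modify_self, hv w hwP]
    have hgne : ∀ x, x ≠ w → (d.modify w 0 (· + 1)).getD x 0 = d.getD x 0 := by
      intro x hx; rw [PySem.Dict.getD_modify, if_neg hx]
    have hcw : ((P ++ [w]).count w : Int) = (P.count w : Int) + 1 := by
      simp [List.count_append]
    have hcne : ∀ x, x ≠ w → (P ++ [w]).count x = P.count x := by
      intro x hx
      simp [List.count_append, Ne.symm hx]
    refine ⟨?_, ?_, ?_⟩
    · rw [hstep]; split
      · exact PySem.Dict.nodup_keys_insert _ _ _ (hkm ▸ hn)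
      · exact hkm ▸ hn
    · intro x
      rw [hstep]; split
      · rw [PySem.Dict.mem_keys_insert, hkm]
        simp only [List.mem_append, List.mem_singleton, ← hm x]
        tauto
      · rw [hkm]
        simp only [List.mem_append, List.mem_singleton, ← hm x]
        exact ⟨Or.inl, fun h => h.elim id (fun he => he ▸ (hm w).mpr hwP)⟩
    · intro x hx
      by_cases hxw : x = w
      · subst hxw
        rw [hstep]; split
        · next hge =>
          rw [hgw] at hge
          rw [PySem.Dict.getD_insert_self, hcw]
          omega
        · next hlt =>
          rw [hgw] at hlt
          rw [hgw, hcw]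
          omega
      · have hxP : x ∈ P := by
          rcases List.mem_append.mp hx with h1 | h1
          · exact h1
          · exact absurd (List.mem_singleton.mp h1) hxw
        rw [hstep]; split
        · rw [PySem.Dict.getD_insert, if_neg hxw, hgne x hxw, hv x hxP, hcne x hxw]
        · rw [hgne x hxw, hv x hxP, hcne x hxw]
  · -- w fresh: A inserts 1, then maybe pins at k
    have hc' : d.contains w = false := by simpa using hc
    have hwP : w ∉ P := by
      intro hwp
      have : d.contains w = true :=
        (PySem.Dict.contains_iff_mem_keys _ _).mpr ((hm w).mpr hwp)
      simp [hc'] at this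
    have hstep : solStepA k d w =
        if (d.insert w 1).getD w 0 ≥ k then (d.insert w 1).insert w k
        else d.insert w 1 := by
      simp [solStepA, hc']
    have h1 : (d.insert w 1).getD w 0 = 1 := PySem.Dict.getD_insert_self _ _ _ _
    have h1ne : ∀ x, x ≠ w → (d.insert w 1).getD x 0 = d.getD x 0 := by
      intro x hx; rw [PySem.Dict.getD_insert, if_neg hx]
    have hcw : (P ++ [w]).count w = 1 := by
      simp [List.count_append, List.count_eq_zero.mpr hwP]
    have hcne : ∀ x, x ≠ w → (P ++ [w]).count x = P.count x := by
      intro x hx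
      simp [List.count_append, Ne.symm hx]
    refine ⟨?_, ?_, ?_⟩
    · rw [hstep]; split
      · exact PySem.Dict.nodup_keys_insert _ _ _ (PySem.Dict.nodup_keys_insert _ _ _ hn)
      · exact PySem.Dict.nodup_keys_insert _ _ _ hn
    · intro x
      rw [hstep]; split
      · simp only [PySem.Dict.mem_keys_insert, List.mem_append, List.mem_singleton, ← hm x]
        tauto
      · simp only [PySem.Dict.mem_keys_insert, List.mem_append, List.mem_singleton, ← hm x]
        tauto
    · intro x hx
      by_cases hxw : x = w
      · subst hxw
        rw [hstep]; split
        · next hge =>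
          rw [h1] at hge
          rw [PySem.Dict.getD_insert_self, hcw]
          simp only [Nat.cast_one]
          omega
        · next hlt =>
          rw [h1] at hlt
          rw [h1, hcw]
          simp only [Nat.cast_one]
          omega
      · have hxP : x ∈ P := by
          rcases List.mem_append.mp hx with h1' | h1'
          · exact h1'
          · exact absurd (List.mem_singleton.mp h1') hxw
        rw [hstep]; split
        · rw [PySem.Dict.getD_insert, if_neg hxw, h1ne x hxw, hv x hxP, hcne x hxw]
        · rw [h1ne x hxw, hv x hxP, hcne x hxw]

theorem dinv_foldl (k : Int) (W : List String) :
    ∀ (P : List String) (d : PySem.Dict String Int), DInv k P d →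
      DInv k (P ++ W) (W.foldl (solStepA k) d) := by
  induction W with
  | nil => intro P d h; simpa using h
  | cons w rest ih =>
    intro P d h
    have := ih (P ++ [w]) _ (dinv_step k P d w h)
    simpa using this

theorem dinv_empty (k : Int) : DInv k [] PySem.Dict.empty := by
  refine ⟨by simp [PySem.Dict.keys_empty], ?_, ?_⟩
  · intro w; simp [PySem.Dict.keys_empty]
  · intro w hw; simp at hw

-- a nested fold over per-item word lists is the fold over the flattened word list
theorem foldl_flatMap_eq {σ α β : Type} (L : List σ) (f : σ → List α) (g : β → α → β) :
    ∀ init, L.foldl (fun d i => (f i).foldl g d) init = (L.flatMap f).foldl g init := by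
  induction L with
  | nil => intro init; rfl
  | cons x xs ih => intro init; simp only [List.flatMap_cons, List.foldl_append, List.foldl_cons, ih]

theorem solution_eq_sum (id_list : List String) (k : Int) :
    solution id_list k =
      (((solDicA id_list k).keys).map
        (fun w => min (((solWords id_list).count w : Int)) k)).sum := by
  have hfold : solDicA id_list k = (solWords id_list).foldl (solStepA k) PySem.Dict.empty := by
    unfold solDicA solWords
    rw [← foldl_flatMap_eq]
  obtain ⟨hn, hm, hv⟩ := dinv_foldl k (solWords id_list) [] PySem.Dict.empty (dinv_empty k)
  simp only [List.nil_append] at hm hv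
  unfold solution
  apply congrArg List.sum
  apply List.map_congr_left
  intro w hw
  rw [hfold] at hw ⊢
  exact hv w ((hm w).mp hw)

-- runScan on a ≤-sorted list sums min(count, k) over any nodup enumeration of its elements
theorem runScan_eq (k : Int) : ∀ (n : Nat) (L : List String), L.length ≤ n →
    L.Pairwise (· ≤ ·) → ∀ (K : List String), K.Nodup → (∀ w, w ∈ K ↔ w ∈ L) →
      runScan k L = (K.map (fun w => min ((L.count w : Int)) k)).sum := by
  intro n
  induction n with
  | zero =>
    intro L hlen _ K _ hmem
    have hL : L = [] := List.eq_nil_of_length_eq_zero (Nat.le_zero.mp hlen)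
    subst hL
    have hK : K = [] := List.eq_nil_iff_forall_not_mem.mpr (fun x hx => by simpa using (hmem x).mp hx)
    subst hK
    simp [runScan]
  | succ n ih =>
    intro L hlen hP K hK hmem
    match L, hlen, hP, hmem with
    | [], _, _, hmem =>
      have hK : K = [] := List.eq_nil_iff_forall_not_mem.mpr (fun x hx => by simpa using (hmem x).mp hx)
      subst hK
      simp [runScan]
    | w :: rest, hlen, hP, hmem =>
      have hwrest : ∀ x ∈ rest, w ≤ x := (List.pairwise_cons.mp hP).1
      have hPrest : rest.Pairwise (· ≤ ·) := (List.pairwise_cons.mp hP).2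
      have hPd : (rest.dropWhile (· == w)).Pairwise (· ≤ ·) :=
        hPrest.sublist (List.dropWhile_sublist _)
      have htall : ∀ x ∈ rest.takeWhile (· == w), x = w := by
        intro x hx
        exact eq_of_beq (List.mem_takeWhile_imp (p := fun x => x == w) (l := rest) hx)
      have hwnot : w ∉ rest.dropWhile (· == w) := by
        intro hmemw
        cases hdr : rest.dropWhile (· == w) with
        | nil => rw [hdr] at hmemw; simp at hmemw
        | cons b tl =>
          have h0 : 0 < (rest.dropWhile (· == w)).length := by rw [hdr]; simp
          have hb := List.dropWhile_get_zero_not (p := fun x => x == w) rest h0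
          have hget : (rest.dropWhile (· == w)).get ⟨0, h0⟩ = b := by
            simp [hdr]
          rw [hget] at hb
          have hbne : b ≠ w := fun he => hb (by simp [he])
          rw [hdr] at hmemw
          rcases List.mem_cons.mp hmemw with h1 | h1
          · exact hbne h1.symm
          · -- w after b in the sorted tail: b ≤ w and w ≤ b force b = w
            have hble : b ≤ w := by
              have hPdr := hPd
              rw [hdr] at hPdr
              exact (List.pairwise_cons.mp hPdr).1 w h1
            have hwleb : w ≤ b := by
              apply hwrest
              have : b ∈ rest.dropWhile (· == w) := by rw [hdr]; exact List.mem_cons_self ..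
              exact (List.dropWhile_sublist _).mem this
            exact hbne (le_antisymm hble hwleb)
      have hsplit : rest.takeWhile (· == w) ++ rest.dropWhile (· == w) = rest :=
        List.takeWhile_append_dropWhile ..
      -- counts in L
      have hcw : ((w :: rest).count w : Int) = 1 + ((rest.takeWhile (· == w)).length : Int) := by
        have h1 : (rest.takeWhile (· == w)).count w = (rest.takeWhile (· == w)).length :=
          List.count_eq_length.mpr (fun b hb => by rw [htall b hb])
        have h2 : (rest.dropWhile (· == w)).count w = 0 := List.count_eq_zero.mpr hwnot
        have h3 : rest.count w = (rest.takeWhile (· == w)).length := by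
          conv_lhs => rw [← hsplit]
          rw [List.count_append, h1, h2]
          omega
        rw [List.count_cons_self, h3]
        push_cast
        ring
      have hcne : ∀ x, x ≠ w → (w :: rest).count x = (rest.dropWhile (· == w)).count x := by
        intro x hx
        have h1 : (rest.takeWhile (· == w)).count x = 0 :=
          List.count_eq_zero.mpr (fun hx' => hx (htall x hx'))
        rw [List.count_cons_of_ne (Ne.symm hx)]
        conv_lhs => rw [← hsplit]
        rw [List.count_append, h1]
        omega
      -- the enumeration splits off w
      have hwK : w ∈ K := (hmem w).mpr (List.mem_cons_self ..)
      have hperm : K.Perm (w :: K.erase w) := List.perm_cons_erase hwK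
      have hKe : (K.erase w).Nodup := hK.erase w
      have hmem' : ∀ x, x ∈ K.erase w ↔ x ∈ rest.dropWhile (· == w) := by
        intro x
        rw [hK.mem_erase_iff]
        constructor
        · rintro ⟨hxw, hxK⟩
          have hxL := (hmem x).mp hxK
          rcases List.mem_cons.mp hxL with h1 | h1
          · exact absurd h1 hxw
          · rw [← hsplit] at h1
            rcases List.mem_append.mp h1 with h2 | h2
            · exact absurd (htall x h2) hxw
            · exact h2
        · intro hx
          refine ⟨fun hxw => hwnot (hxw ▸ hx), (hmem x).mpr ?_⟩
          apply List.mem_cons_of_mem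
          exact (List.dropWhile_sublist _).mem hx
      have hlen' : (rest.dropWhile (· == w)).length ≤ n :=
        le_trans (List.length_dropWhile_le _ _) (by simpa using Nat.le_of_succ_le_succ hlen)
      have hih := ih (rest.dropWhile (· == w)) hlen' hPd (K.erase w) hKe hmem'
      -- assemble
      rw [runScan, hih]
      have hsum : (K.map (fun x => min (((w :: rest).count x : Int)) k)).sum =
          min (((w :: rest).count w : Int)) k +
            ((K.erase w).map (fun x => min (((w :: rest).count x : Int)) k)).sum := by
        rw [(hperm.map _).sum_eq]
        simp
      rw [hsum, hcw]
      congr 1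
      apply congrArg List.sum
      apply List.map_congr_left
      intro x hx
      rw [hcne x (hK.mem_erase_iff.mp hx).1]

-- ===== VERDICT (by name: the statement is the Claim_ definition above) =====
theorem solution_spec : Claim_equal_solution := by
  intro id_list k _
  unfold Spec_solution solution_alt
  have hfold : solDicA id_list k = (solWords id_list).foldl (solStepA k) PySem.Dict.empty := by
    unfold solDicA solWords
    rw [← foldl_flatMap_eq]
  obtain ⟨hn, hm, hv⟩ := dinv_foldl k (solWords id_list) [] PySem.Dict.empty (dinv_empty k)
  simp only [List.nil_append] at hm hv
  rw [← hfold] at hn hm hv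
  have hperm : (PySem.List.sorted (solWords id_list) (fun x => x) false).Perm (solWords id_list) :=
    PySem.List.sorted_perm _ _ _
  have hpair : (PySem.List.sorted (solWords id_list) (fun x => x) false).Pairwise (· ≤ ·) :=
    PySem.List.sorted_pairwise _ _
  have hmemK : ∀ w, w ∈ (solDicA id_list k).keys ↔
      w ∈ PySem.List.sorted (solWords id_list) (fun x => x) false := by
    intro w
    rw [hperm.mem_iff]
    exact hm w
  have hrs := runScan_eq k (PySem.List.sorted (solWords id_list) (fun x => x) false).length
    (PySem.List.sorted (solWords id_list) (fun x => x) false) le_rfl hpair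
    (solDicA id_list k).keys hn hmemK
  rw [solution_eq_sum]
  show _ = runScan k (PySem.List.sorted (solWords id_list) (fun x => x) false)
  rw [hrs]
  apply congrArg List.sum
  apply List.map_congr_left
  intro w _
  rw [hperm.count_eq]
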